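-- pv_equiv track=rewrite | github.com/vsharad/python-nptel | test2.py | maxaggregate
-- ===== SOURCE A (Python) =====
-- def maxaggregate(l):
--   scores = dict()
--   for name,score in l:
--     if name in scores.keys():
--       scores[name] += score
--     else:
--       scores[name] = score
--   max_score = max(scores.values())
--   max_scorers = [name for name,score in scores.items() if score == max_score]
--   max_scorers.sort()
--   return max_scorers
-- ===== SOURCE B (Python) =====
-- def maxaggregate(l):
--   pairs = sorted(l, key=lambda p: p[0])
--   groups = []
--   for name, score in pairs:
--     if groups and groups[-1][0] == name:
--       groups[-1] = (name, groups[-1][1] + score)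
--     else:
--       groups.append((name, score))
--   best = max(t for _, t in groups)
--   return [n for n, t in groups if t == best]
-- ===== Notes on version B (the rewrite author's own statement) =====
-- stated objective: alternative
-- what changed: Replaces the dict accumulation plus separate max scan and final sort by sort-then-group aggregation: the pairs are sorted by name once, consecutive equal names are merged in one scan, and the winners are emitted already in name order with no final sort.
import Mathlib
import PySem

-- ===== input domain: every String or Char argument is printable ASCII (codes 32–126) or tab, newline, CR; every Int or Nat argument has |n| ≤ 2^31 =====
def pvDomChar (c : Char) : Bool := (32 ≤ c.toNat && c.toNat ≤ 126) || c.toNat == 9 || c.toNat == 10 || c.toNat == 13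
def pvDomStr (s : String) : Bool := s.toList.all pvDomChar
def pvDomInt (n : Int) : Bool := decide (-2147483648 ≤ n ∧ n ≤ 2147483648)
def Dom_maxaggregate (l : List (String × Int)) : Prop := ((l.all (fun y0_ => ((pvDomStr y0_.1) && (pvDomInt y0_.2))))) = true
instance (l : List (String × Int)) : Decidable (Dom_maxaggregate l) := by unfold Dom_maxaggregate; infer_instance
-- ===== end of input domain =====

-- B replaces A's dict accumulation + separate max scan + final sort by a sort-then-group
-- aggregation over the name-sorted pairs (alternative decomposition, same exact result).


-- ===== PORT A =====
def maxaggregate (l : List (String × Int)) : List String :=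
  let scores : PySem.Dict String Int :=
    l.foldl (fun d p =>
      if d.contains p.1 then d.insert p.1 (d.getD p.1 0 + p.2)   -- scores[name] += score
      else d.insert p.1 p.2) PySem.Dict.empty
  match PySem.List.max? scores.values (fun v => v) with
  | none => []   -- Python raises ValueError here (empty dict); excluded by Pre_
  | some maxScore =>
    let maxScorers := (scores.items.filter (fun p => p.2 == maxScore)).map (·.1)
    PySem.List.sorted maxScorers (fun x => x) false

-- ===== PORT B =====
-- one grouping step over the name-sorted pairs: merge into the last group or open a new one
def bstep (gs : List (String × Int)) (p : String × Int) : List (String × Int) :=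
  match gs.getLast? with
  | some q => if q.1 == p.1 then gs.dropLast ++ [(p.1, q.2 + p.2)] else gs ++ [p]
  | none => gs ++ [p]

def maxaggregate_alt (l : List (String × Int)) : List String :=
  let pairs := PySem.List.sorted l (fun p => p.1) false
  let groups := pairs.foldl bstep []
  match PySem.List.max? (groups.map (·.2)) (fun v => v) with
  | none => []   -- Python raises ValueError here (empty generator); excluded by Pre_
  | some best => (groups.filter (fun q => q.2 == best)).map (·.1)

-- ===== PRECONDITION & SPEC =====
-- Pre_ excludes only the empty list, on which Python's max() raises ValueError in both A and B.
def Pre_maxaggregate (l : List (String × Int)) : Prop := l ≠ []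
instance (l : List (String × Int)) : Decidable (Pre_maxaggregate l) := by unfold Pre_maxaggregate; infer_instance
def pvWitness_maxaggregate : (List (String × Int)) := [("a", 1), ("b", 2), ("a", 2)]

def Spec_maxaggregate (l : List (String × Int)) (out : List String) : Prop := out = maxaggregate_alt l
instance (l : List (String × Int)) (out : List String) : Decidable (Spec_maxaggregate l out) := by unfold Spec_maxaggregate; infer_instance

-- ===== CLAIM (what is proved, stated in full; the proofs are below) =====
def Claim_equal_maxaggregate : Prop := ∀ (l : List (String × Int)), Dom_maxaggregate l → Pre_maxaggregate l → Spec_maxaggregate l (maxaggregate l)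

-- ===== LEMMAS AND PROOFS =====

-- total score of name n in l
def tot (l : List (String × Int)) (n : String) : Int :=
  ((l.filter (fun p => p.1 == n)).map (·.2)).sum

-- spec-side grouping: one aggregated (name, total) pair per distinct name, first name first
def agg : List (String × Int) → List (String × Int)
  | [] => []
  | p :: rest => (p.1, p.2 + tot rest p.1) :: agg (rest.filter (fun q => q.1 != p.1))
termination_by l => l.length
decreasing_by simp; exact le_trans (List.length_filter_le _ _) (by simp)

theorem agg_nil : agg [] = [] := by rw [agg]

theorem agg_cons (p : String × Int) (rest : List (String × Int)) :
    agg (p :: rest) = (p.1, p.2 + tot rest p.1) :: agg (rest.filter (fun q => q.1 != p.1)) := by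
  rw [agg]

theorem tot_nil (n : String) : tot [] n = 0 := rfl

theorem tot_cons (p : String × Int) (rest : List (String × Int)) (n : String) :
    tot (p :: rest) n = (if p.1 = n then p.2 else 0) + tot rest n := by
  by_cases h : p.1 = n <;> simp [tot, h]

theorem tot_eq_zero {l : List (String × Int)} {n : String}
    (h : ∀ q ∈ l, q.1 ≠ n) : tot l n = 0 := by
  have : l.filter (fun p => p.1 == n) = [] := by
    simp only [List.filter_eq_nil_iff]
    intro q hq; simpa using h q hq
  simp [tot, this]

theorem tot_filter_ne (l : List (String × Int)) {n m : String} (h : n ≠ m) :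
    tot (l.filter (fun q => q.1 != m)) n = tot l n := by
  induction l with
  | nil => rfl
  | cons p rest ih =>
    by_cases hp : p.1 = m
    · simp only [List.filter_cons, hp]
      simp [tot_cons, hp, ih]
      exact fun e => absurd e.symm h
    · simp only [List.filter_cons]
      simp [hp, tot_cons, ih]

theorem tot_perm {l l' : List (String × Int)} (h : l.Perm l') (n : String) :
    tot l n = tot l' n :=
  List.Perm.sum_eq (List.Perm.map _ (List.Perm.filter _ h))

theorem foldl_bstep (ps : List (String × Int)) : ∀ (acc : List (String × Int)) (n : String) (s : Int),
    (∀ q ∈ ps, n ≤ q.1) → ps.Pairwise (fun a b => a.1 ≤ b.1) →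
    ps.foldl bstep (acc ++ [(n, s)]) =
      acc ++ (n, s + tot ps n) :: agg (ps.filter (fun q => q.1 != n)) := by
  induction ps with
  | nil => intro acc n s _ _; simp [agg_nil, tot_nil]
  | cons p rest ih =>
    intro acc n s hle hpw
    have hle' : ∀ q ∈ rest, n ≤ q.1 := fun q hq => hle q (List.mem_cons_of_mem _ hq)
    have hrest : ∀ q ∈ rest, p.1 ≤ q.1 := (List.pairwise_cons.mp hpw).1
    have hpw' : rest.Pairwise (fun a b => a.1 ≤ b.1) := (List.pairwise_cons.mp hpw).2
    by_cases h : n = p.1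
    · have hstep : bstep (acc ++ [(n, s)]) p = acc ++ [(n, s + p.2)] := by
        simp [bstep, h]
      rw [List.foldl_cons, hstep, ih acc n (s + p.2) hle' hpw']
      have hfil : (p :: rest).filter (fun q => q.1 != n) = rest.filter (fun q => q.1 != n) := by
        simp [h]
      rw [hfil, tot_cons]
      simp [← h, add_assoc]
    · have hlt : n < p.1 := lt_of_le_of_ne (hle p (List.mem_cons_self)) h
      have hne : ∀ q ∈ rest, q.1 ≠ n := fun q hq => ne_of_gt (lt_of_lt_of_le hlt (hrest q hq))
      have hstep : bstep (acc ++ [(n, s)]) p = (acc ++ [(n, s)]) ++ [(p.1, p.2)] := by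
        simp [bstep, h]
      rw [List.foldl_cons, hstep, ih (acc ++ [(n, s)]) p.1 p.2 hrest hpw']
      have hrfil : rest.filter (fun q => q.1 != n) = rest :=
        List.filter_eq_self.mpr (fun q hq => by simpa using hne q hq)
      have hfil : (p :: rest).filter (fun q => q.1 != n) = p :: rest := by
        simp [Ne.symm h, hrfil]
      rw [hfil, agg_cons, tot_cons]
      have h0 : tot rest n = 0 := tot_eq_zero hne
      simp [h0]
      exact fun e => absurd e.symm h

theorem bgroups_eq_agg (ps : List (String × Int))
    (hpw : ps.Pairwise (fun a b => a.1 ≤ b.1)) : ps.foldl bstep [] = agg ps := by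
  cases ps with
  | nil => simp [agg_nil]
  | cons p rest =>
    have hstep : bstep [] p = [] ++ [(p.1, p.2)] := by simp [bstep]
    rw [List.foldl_cons, hstep,
      foldl_bstep rest [] p.1 p.2 (List.pairwise_cons.mp hpw).1 (List.pairwise_cons.mp hpw).2,
      agg_cons]
    simp

theorem agg_names_mem_aux (N : Nat) : ∀ (ps : List (String × Int)), ps.length ≤ N → ∀ (n : String),
    (n ∈ (agg ps).map (·.1) ↔ n ∈ ps.map (·.1)) := by
  induction N with
  | zero =>
    intro ps hlen n
    rw [List.length_eq_zero_iff.mp (Nat.le_zero.mp hlen)]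
    simp [agg_nil]
  | succ N ih =>
    intro ps hlen n
    cases ps with
    | nil => simp [agg_nil]
    | cons p rest =>
      have hlen' : (rest.filter (fun q => q.1 != p.1)).length ≤ N :=
        le_trans (List.length_filter_le _ _) (by simpa using Nat.lt_succ_iff.mp (by simpa using hlen))
      rw [agg_cons]
      simp only [List.map_cons, List.mem_cons, ih _ hlen' n]
      constructor
      · rintro (h | h)
        · exact Or.inl h
        · rcases List.mem_map.mp h with ⟨q, hq, e⟩
          exact Or.inr (List.mem_map.mpr ⟨q, (List.mem_filter.mp hq).1, e⟩)
      · rintro (h | h)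
        · exact Or.inl h
        · rcases List.mem_map.mp h with ⟨q, hq, e⟩
          by_cases hqe : q.1 = p.1
          · exact Or.inl (e ▸ hqe)
          · exact Or.inr (List.mem_map.mpr ⟨q, List.mem_filter.mpr ⟨hq, by simpa using hqe⟩, e⟩)

theorem agg_names_mem (ps : List (String × Int)) (n : String) :
    n ∈ (agg ps).map (·.1) ↔ n ∈ ps.map (·.1) :=
  agg_names_mem_aux ps.length ps le_rfl n

theorem agg_snd_mem_aux (N : Nat) : ∀ (ps : List (String × Int)), ps.length ≤ N →
    ps.Pairwise (fun a b => a.1 ≤ b.1) → ∀ q ∈ agg ps, q.2 = tot ps q.1 := by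
  induction N with
  | zero =>
    intro ps hlen _ q hq
    rw [List.length_eq_zero_iff.mp (Nat.le_zero.mp hlen), agg_nil] at hq
    cases hq
  | succ N ih =>
    intro ps hlen hpw q hq
    cases ps with
    | nil => rw [agg_nil] at hq; cases hq
    | cons p rest =>
      have hlen' : (rest.filter (fun q => q.1 != p.1)).length ≤ N :=
        le_trans (List.length_filter_le _ _) (by simpa using Nat.lt_succ_iff.mp (by simpa using hlen))
      have hpw' : (rest.filter (fun q => q.1 != p.1)).Pairwise (fun a b => a.1 ≤ b.1) :=
        List.Pairwise.sublist (List.filter_sublist) (List.pairwise_cons.mp hpw).2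
      rw [agg_cons] at hq
      rcases List.mem_cons.mp hq with h | h
      · subst h; simp [tot_cons]
      · have h1 : q.2 = tot (rest.filter (fun q => q.1 != p.1)) q.1 := ih _ hlen' hpw' q h
        have hq1 : q.1 ∈ (rest.filter (fun r => r.1 != p.1)).map (·.1) :=
          (agg_names_mem _ q.1).mp (List.mem_map_of_mem h)
        have hne : q.1 ≠ p.1 := by
          rcases List.mem_map.mp hq1 with ⟨r, hr, e⟩
          have := (List.mem_filter.mp hr).2
          simpa [← e] using this
        rw [h1, tot_filter_ne _ hne, tot_cons]
        simp
        exact fun e => absurd e.symm hne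

theorem agg_snd_mem (ps : List (String × Int)) (hpw : ps.Pairwise (fun a b => a.1 ≤ b.1)) :
    ∀ q ∈ agg ps, q.2 = tot ps q.1 :=
  agg_snd_mem_aux ps.length ps le_rfl hpw

theorem agg_names_pairwise_aux (N : Nat) : ∀ (ps : List (String × Int)), ps.length ≤ N →
    ps.Pairwise (fun a b => a.1 ≤ b.1) → ((agg ps).map (·.1)).Pairwise (· < ·) := by
  induction N with
  | zero =>
    intro ps hlen _
    rw [List.length_eq_zero_iff.mp (Nat.le_zero.mp hlen), agg_nil]
    simp
  | succ N ih =>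
    intro ps hlen hpw
    cases ps with
    | nil => rw [agg_nil]; simp
    | cons p rest =>
      have hlen' : (rest.filter (fun q => q.1 != p.1)).length ≤ N :=
        le_trans (List.length_filter_le _ _) (by simpa using Nat.lt_succ_iff.mp (by simpa using hlen))
      have hrest : ∀ q ∈ rest, p.1 ≤ q.1 := (List.pairwise_cons.mp hpw).1
      have hpw' : (rest.filter (fun q => q.1 != p.1)).Pairwise (fun a b => a.1 ≤ b.1) :=
        List.Pairwise.sublist (List.filter_sublist) (List.pairwise_cons.mp hpw).2
      rw [agg_cons]
      simp only [List.map_cons, List.pairwise_cons]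
      refine ⟨?_, ih _ hlen' hpw'⟩
      intro m hm
      rcases List.mem_map.mp ((agg_names_mem _ m).mp hm) with ⟨r, hr, e⟩
      have h1 := (List.mem_filter.mp hr).1
      have h2 : r.1 ≠ p.1 := by simpa using (List.mem_filter.mp hr).2
      subst e
      exact lt_of_le_of_ne (hrest r h1) (Ne.symm h2)

theorem agg_names_pairwise (ps : List (String × Int))
    (hpw : ps.Pairwise (fun a b => a.1 ≤ b.1)) : ((agg ps).map (·.1)).Pairwise (· < ·) :=
  agg_names_pairwise_aux ps.length ps le_rfl hpw

theorem getD_foldl_A (l : List (String × Int)) (d : PySem.Dict String Int) (n : String) :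
    (l.foldl (fun d p => d.insert p.1 (d.getD p.1 0 + p.2)) d).getD n 0 = d.getD n 0 + tot l n := by
  induction l generalizing d with
  | nil => simp [tot_nil]
  | cons p rest ih =>
    rw [List.foldl_cons, ih, tot_cons, PySem.Dict.getD_insert]
    by_cases h : n = p.1
    · rw [if_pos h, if_pos h.symm, h]; ring
    · rw [if_neg h, if_neg (fun e => h e.symm)]; ring

theorem max?_id_perm {xs ys : List Int} (h : xs.Perm ys) :
    PySem.List.max? xs (fun v => v) = PySem.List.max? ys (fun v => v) := by
  cases hx : PySem.List.max? xs (fun v => v) with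
  | none =>
    rw [(PySem.List.max?_eq_none_iff _ _).mp hx] at h
    rw [(PySem.List.max?_eq_none_iff _ _).mpr h.nil_eq.symm]
  | some m =>
    cases hy : PySem.List.max? ys (fun v => v) with
    | none =>
      rw [(PySem.List.max?_eq_none_iff _ _).mp hy] at h
      rw [(PySem.List.max?_eq_none_iff _ _).mpr h.eq_nil] at hx
      cases hx
    | some m' =>
      have hm : m ∈ xs := PySem.List.max?_mem hx
      have hm' : m' ∈ ys := PySem.List.max?_mem hy
      have h1 : m ≤ m' := PySem.List.max?_isMax hy m (h.subset hm)
      have h2 : m' ≤ m := PySem.List.max?_isMax hx m' (h.symm.subset hm')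
      rw [le_antisymm h1 h2]

-- ===== VERDICT (by name: the statement is the Claim_ definition above) =====
theorem maxaggregate_spec : Claim_equal_maxaggregate := by
  intro l _ hpre
  show maxaggregate l = maxaggregate_alt l
  have hstep : l.foldl (fun (d : PySem.Dict String Int) p =>
      if d.contains p.1 then d.insert p.1 (d.getD p.1 0 + p.2) else d.insert p.1 p.2)
      PySem.Dict.empty
      = l.foldl (fun d p => d.insert p.1 (d.getD p.1 0 + p.2)) PySem.Dict.empty := by
    apply PySem.List.foldl_congr_mem
    intro d p _
    cases hc : d.contains p.1 with
    | true => simp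
    | false =>
      simp only [Bool.false_eq_true, if_false]
      rw [PySem.Dict.getD_of_not_contains d 0 hc, zero_add]
  set scores := l.foldl (fun (d : PySem.Dict String Int) p => d.insert p.1 (d.getD p.1 0 + p.2)) PySem.Dict.empty with hsc
  set names : List String := l.map (·.1) with hnames
  have hkeys : scores.keys = PySem.Set.ofList names := by
    rw [hsc, PySem.Dict.keys_foldl_insert_key, PySem.Dict.keys_empty, PySem.Set.update_nil_left]
  have hnodup : scores.keys.Nodup :=
    PySem.Dict.nodup_keys_foldl_insert_key l _ _ _ PySem.Dict.nodup_keys_empty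
  have hgetD : ∀ n, scores.getD n 0 = tot l n := by
    intro n; rw [hsc, getD_foldl_A, PySem.Dict.getD_empty, zero_add]
  have hitems : scores.items = (PySem.Set.ofList names).map (fun k => (k, tot l k)) := by
    rw [PySem.Dict.items_eq_map_keys scores hnodup 0, hkeys]
    exact List.map_congr_left (fun k _ => by rw [hgetD k])
  have hvalues : scores.values = (PySem.Set.ofList names).map (fun k => tot l k) := by
    rw [PySem.Dict.values_eq_map_keys scores hnodup 0, hkeys]
    exact List.map_congr_left (fun k _ => by rw [hgetD k])
  -- B side
  set ps := PySem.List.sorted l (fun p => p.1) false with hps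
  have hperm : ps.Perm l := PySem.List.sorted_perm l (fun p => p.1) false
  have hpw : ps.Pairwise (fun a b => a.1 ≤ b.1) := PySem.List.sorted_pairwise l (fun p => p.1)
  set Bnames : List String := (agg ps).map (·.1) with hBnames
  have hgroups_eq : agg ps = Bnames.map (fun n => (n, tot l n)) := by
    rw [hBnames, List.map_map]
    symm
    calc (agg ps).map ((fun n => (n, tot l n)) ∘ (·.1))
        = (agg ps).map id := List.map_congr_left (fun q hq => by
          have h2 := agg_snd_mem ps hpw q hq
          simp [Function.comp, ← tot_perm hperm q.1, ← h2])
      _ = agg ps := List.map_id _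
  have hBpw : Bnames.Pairwise (· < ·) := agg_names_pairwise ps hpw
  have hBnodup : Bnames.Nodup := hBpw.imp ne_of_lt
  have hnamesPerm : Bnames.Perm (PySem.Set.ofList names) := by
    refine (List.perm_ext_iff_of_nodup hBnodup (PySem.Set.nodup_ofList names)).mpr ?_
    intro a
    rw [PySem.Set.mem_ofList, hBnames, agg_names_mem, hnames]
    exact ⟨fun h => (hperm.map (·.1)).subset h, fun h => ((hperm.map (·.1)).symm.subset) h⟩
  have hitemsPerm : (agg ps).Perm scores.items := by
    rw [hgroups_eq, hitems]; exact hnamesPerm.map _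
  have hvalsPerm : ((agg ps).map (·.2)).Perm scores.values := by
    rw [hvalues, hgroups_eq, List.map_map]
    exact hnamesPerm.map _
  have hmax : PySem.List.max? scores.values (fun v => v)
      = PySem.List.max? ((agg ps).map (·.2)) (fun v => v) := max?_id_perm hvalsPerm.symm
  simp only [maxaggregate, maxaggregate_alt]
  rw [hstep, ← hps, bgroups_eq_agg ps hpw, ← hmax]
  cases hM : PySem.List.max? scores.values (fun v => v) with
  | none => rfl
  | some m =>
    apply PySem.List.sorted_eq_of_perm_of_pairwise_lt
    · exact ((hitemsPerm.filter _).map _)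
    · have hsub : (((agg ps).filter (fun q => q.2 == m)).map (·.1)).Sublist Bnames :=
        List.Sublist.map _ (List.filter_sublist)
      exact List.Pairwise.sublist hsub hBpw
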